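-- pv_equiv track=rewrite | github.com/cjadams18/2024-AoC | 2/test.py | same_direction
-- ===== SOURCE A (Python) =====
-- def same_direction(input):
--     asc = input[0] < input[1]
--     for i in range(len(input) - 1):
--         if asc and input[i] > input[i + 1]:
--             return False
--         elif not asc and input[i] < input[i + 1]:
--             return False
--     return True
--
-- input = [45, 67, 89, 34]
-- ===== SOURCE B (Python) =====
-- def same_direction(input):
--     asc = input[0] < input[1]
--     if asc:
--         return input == sorted(input)
--     return input == sorted(input, reverse=True)
-- ===== Notes on version B (the rewrite author's own statement) =====
-- stated objective: simpler
-- what changed: Replaces the index loop over adjacent pairs (with early returns) by comparing the list with its sorted (or reverse-sorted) copy.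
import Mathlib
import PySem

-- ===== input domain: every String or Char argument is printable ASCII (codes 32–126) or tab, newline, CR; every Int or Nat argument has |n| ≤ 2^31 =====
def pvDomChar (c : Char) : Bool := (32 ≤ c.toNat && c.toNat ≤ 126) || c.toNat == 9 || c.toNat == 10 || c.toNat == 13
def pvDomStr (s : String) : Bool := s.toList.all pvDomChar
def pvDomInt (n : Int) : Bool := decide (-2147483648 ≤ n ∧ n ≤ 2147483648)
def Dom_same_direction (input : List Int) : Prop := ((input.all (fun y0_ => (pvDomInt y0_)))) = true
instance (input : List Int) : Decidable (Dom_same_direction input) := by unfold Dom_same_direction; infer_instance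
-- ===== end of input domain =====

-- B replaces A's index loop over adjacent pairs (with early returns) by comparing
-- the list with its sorted (or reverse-sorted) copy; objective: simpler.

-- ===== PORT A =====
-- the for-loop of A: early return False on a bad adjacent pair, else continue
def sdLoop (input : List Int) (asc : Bool) : List Int → Bool
  | [] => true
  | i :: rest =>
    if asc && decide (PySem.List.pyGetD input i 0 > PySem.List.pyGetD input (i + 1) 0) then false
    else if !asc && decide (PySem.List.pyGetD input i 0 < PySem.List.pyGetD input (i + 1) 0) then false
    else sdLoop input asc rest

def same_direction (input : List Int) : Bool :=
  match PySem.List.pyGet? input 0 with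
  | none => false  -- unreachable under Pre_ (Python raises IndexError)
  | some a =>
    match PySem.List.pyGet? input 1 with
    | none => false  -- unreachable under Pre_ (Python raises IndexError)
    | some b =>
        sdLoop input (decide (a < b)) (PySem.List.pyRange 0 ((input.length : Int) - 1) 1)

-- ===== PORT B =====
def same_direction_alt (input : List Int) : Bool :=
  match PySem.List.pyGet? input 0, PySem.List.pyGet? input 1 with
  | some a, some b =>
      if a < b then decide (input = PySem.List.sorted input (fun x => x) false)
      else decide (input = PySem.List.sorted input (fun x => x) true)
  | _, _ => false  -- unreachable under Pre_ (Python raises IndexError)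

-- ===== PRECONDITION & SPEC =====
-- Python A raises IndexError on lists with fewer than two elements
def Pre_same_direction (input : List Int) : Prop := 2 ≤ input.length
instance (input : List Int) : Decidable (Pre_same_direction input) := by unfold Pre_same_direction; infer_instance
def pvWitness_same_direction : List Int := [45, 67, 89, 34]

def Spec_same_direction (input : List Int) (out : Bool) : Prop := out = same_direction_alt input
instance (input : List Int) (out : Bool) : Decidable (Spec_same_direction input out) := by unfold Spec_same_direction; infer_instance

-- ===== CLAIM (what is proved, stated in full; the proofs are below) =====
def Claim_equal_same_direction : Prop := ∀ (input : List Int), Dom_same_direction input → Pre_same_direction input → Spec_same_direction input (same_direction input)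

-- ===== LEMMAS AND PROOFS =====

-- A's loop carries no state: it is an `all` over the index list
theorem sdLoop_eq_all (input : List Int) (asc : Bool) (L : List Int) :
    sdLoop input asc L = L.all (fun i =>
      !(asc && decide (PySem.List.pyGetD input i 0 > PySem.List.pyGetD input (i + 1) 0)) &&
      !(!asc && decide (PySem.List.pyGetD input i 0 < PySem.List.pyGetD input (i + 1) 0))) := by
  induction L with
  | nil => rfl
  | cons i rest ih =>
    simp only [sdLoop, List.all_cons, ih]
    by_cases h1 : asc && decide (PySem.List.pyGetD input i 0 > PySem.List.pyGetD input (i + 1) 0)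
    · simp [h1]
    · by_cases h2 : !asc && decide (PySem.List.pyGetD input i 0 < PySem.List.pyGetD input (i + 1) 0)
      · simp [h1, h2]
      · simp [h1, h2]

theorem sorted_asc_iff (input : List Int) :
    input = PySem.List.sorted input (fun x => x) false ↔ input.Pairwise (· ≤ ·) := by
  constructor
  · intro h
    have hp := PySem.List.sorted_pairwise input (fun x : Int => x)
    rw [← h] at hp
    exact hp
  · intro h
    exact (PySem.List.sorted_eq_self_of_pairwise input (fun x : Int => x) h).symm

theorem sorted_desc_iff (input : List Int) :
    input = PySem.List.sorted input (fun x => x) true ↔ input.Pairwise (fun a b => b ≤ a) := by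
  constructor
  · intro h
    have hp := PySem.List.sorted_pairwise_rev input (fun x : Int => x)
    rw [← h] at hp
    exact hp
  · intro h
    exact (PySem.List.sorted_rev_eq_self_of_pairwise input (fun x : Int => x) h).symm

-- `all` over range(len-1) of an adjacent-pair test ↔ the pairwise adjacent condition
theorem all_range_iff (input : List Int) (q : Int → Bool) (r : Int → Int → Prop)
    (hq : ∀ (k : Nat), (h : k + 1 < input.length) → (q (k : Int) = true ↔ r input[k] input[k + 1])) :
    ((PySem.List.pyRange 0 ((input.length : Int) - 1) 1).all q = true) ↔
    (∀ k : Nat, (h : k + 1 < input.length) → r input[k] input[k + 1]) := by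
  rw [List.all_eq_true]
  constructor
  · intro h k hk
    have hmem : (k : Int) ∈ PySem.List.pyRange 0 ((input.length : Int) - 1) 1 := by
      rw [PySem.List.mem_pyRange_one]
      omega
    exact (hq k hk).mp (h _ hmem)
  · intro h i hi
    rw [PySem.List.mem_pyRange_one] at hi
    obtain ⟨h0, h1⟩ := hi
    obtain ⟨k, rfl⟩ := Int.eq_ofNat_of_zero_le h0
    have hk : k + 1 < input.length := by omega
    exact (hq k hk).mpr (h k hk)

theorem pairwise_iff_adjacent (input : List Int) (r : Int → Int → Prop) [Trans r r r] :
    input.Pairwise r ↔ (∀ k : Nat, (h : k + 1 < input.length) → r input[k] input[k + 1]) := by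
  rw [← List.isChain_iff_pairwise, List.isChain_iff_getElem]

theorem pyGetD_nat (input : List Int) (k : Nat) (h : k < input.length) :
    PySem.List.pyGetD input (k : Int) 0 = input[k] := by
  rw [PySem.List.pyGetD_natCast]
  exact List.getD_eq_getElem _ _ h

theorem pyGetD_nat_succ (input : List Int) (k : Nat) (h : k + 1 < input.length) :
    PySem.List.pyGetD input ((k : Int) + 1) 0 = input[k + 1] := by
  have e : ((k : Int) + 1) = ((k + 1 : Nat) : Int) := by push_cast; ring
  rw [e]
  exact pyGetD_nat input (k + 1) h

-- ===== VERDICT (by name: the statement is the Claim_ definition above) =====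
theorem same_direction_spec : Claim_equal_same_direction := by
  intro input _ hpre
  unfold Spec_same_direction same_direction same_direction_alt
  unfold Pre_same_direction at hpre
  obtain ⟨a, b, rest, rfl⟩ : ∃ a b rest, input = a :: b :: rest := by
    match input, hpre with
    | a :: b :: rest, _ => exact ⟨a, b, rest, rfl⟩
  set input := a :: b :: rest with hinput
  have hlen : 2 ≤ input.length := hpre
  have h0 : PySem.List.pyGet? input 0 = some a := by
    have := PySem.List.pyGet?_ofNat input 0 (by omega)
    simpa [hinput] using this
  have h1 : PySem.List.pyGet? input 1 = some b := by
    have := PySem.List.pyGet?_ofNat input 1 (by omega)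
    simpa [hinput] using this
  rw [h0, h1]
  dsimp only
  by_cases hab : a < b
  · rw [if_pos hab]
    have hd : decide (a < b) = true := by simp [hab]
    rw [hd, sdLoop_eq_all]
    have key := all_range_iff input
      (fun i => !(true && decide (PySem.List.pyGetD input i 0 > PySem.List.pyGetD input (i + 1) 0)) &&
        !(!true && decide (PySem.List.pyGetD input i 0 < PySem.List.pyGetD input (i + 1) 0)))
      (· ≤ ·)
      (by
        intro k hk
        simp only [pyGetD_nat input k (by omega), pyGetD_nat_succ input k hk]
        simp)
    rw [Bool.eq_iff_iff, decide_eq_true_iff, sorted_asc_iff, key]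
    exact (pairwise_iff_adjacent input (· ≤ ·)).symm
  · rw [if_neg hab]
    have hd : decide (a < b) = false := by simp [hab]
    rw [hd, sdLoop_eq_all]
    haveI : Trans (fun a b : Int => b ≤ a) (fun a b : Int => b ≤ a) (fun a b : Int => b ≤ a) :=
      ⟨fun h1 h2 => le_trans h2 h1⟩
    have key := all_range_iff input
      (fun i => !(false && decide (PySem.List.pyGetD input i 0 > PySem.List.pyGetD input (i + 1) 0)) &&
        !(!false && decide (PySem.List.pyGetD input i 0 < PySem.List.pyGetD input (i + 1) 0)))
      (fun x y => y ≤ x)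
      (by
        intro k hk
        simp only [pyGetD_nat input k (by omega), pyGetD_nat_succ input k hk]
        simp)
    rw [Bool.eq_iff_iff, decide_eq_true_iff, sorted_desc_iff, key]
    exact (pairwise_iff_adjacent input (fun x y => y ≤ x)).symm
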